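-- pv_equiv track=rewrite | github.com/hwbest403/Portfolio | MathAI/1step-model/functions.py | func_findbasicseq
-- ===== SOURCE A (Python) =====
-- def func_findbasicseq(rep_seq_list, rep_num_list):
--     seq_list = list()
--     if rep_num_list is None:
--         cut_num = len(rep_seq_list) // 2
--         for i in range(2, cut_num + 1):
--             seq_num = i
--             seq_a = rep_seq_list[:seq_num]
--             seq_b = rep_seq_list[seq_num:seq_num + seq_num]
--             if seq_a == seq_b:
--                 seq_list = seq_a
--                 break
--             seq_list = rep_seq_list
--     else:
--         for i in range(len(rep_num_list)):
--             dis_rep_seq = rep_seq_list[i]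
--             dis_rep_num = rep_num_list[i]
--             for j in range(dis_rep_num):
--                 seq_list.append(rep_seq_list[i])
--
--     result = seq_list
--     return result
-- ===== SOURCE B (Python) =====
-- def func_findbasicseq(rep_seq_list, rep_num_list):
--     if rep_num_list is not None:
--         out = []
--         for x, k in zip(rep_seq_list, rep_num_list):
--             out += [x] * k
--         return out
--     s = rep_seq_list
--     n = len(s)
--     # Z-algorithm: z[i] = length of the longest common prefix of s and s[i:],
--     # computed with the standard (l, r) match window.
--     z = [0] * n
--     l = r = 0
--     for i in range(1, n):
--         k = min(r - i, z[i - l]) if i < r else 0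
--         while i + k < n and s[k] == s[i + k]:
--             k += 1
--         z[i] = k
--         if i + k > r:
--             l, r = i, i + k
--     for i in range(2, n // 2 + 1):
--         if z[i] >= i:
--             return s[:i]
--     return s
-- ===== Notes on version B (the rewrite author's own statement) =====
-- stated objective: alternative
-- what changed: A's scan comparing seq[:i]==seq[i:2i] for each candidate i is replaced by the Z-algorithm (answer = first i in [2, n//2] with z[i] >= i), and A's index-driven nested append loops become a zip loop using list repetition.
-- intended difference: On rep_num_list=None inputs of length 1..3 A's candidate range is empty and it returns the leftover initial [], while B returns the whole rep_seq_list, the intended 'no shorter basic sequence found' answer. — e.g. on func_findbasicseq([7], none): A returns [], B returns [7]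
import Mathlib
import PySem

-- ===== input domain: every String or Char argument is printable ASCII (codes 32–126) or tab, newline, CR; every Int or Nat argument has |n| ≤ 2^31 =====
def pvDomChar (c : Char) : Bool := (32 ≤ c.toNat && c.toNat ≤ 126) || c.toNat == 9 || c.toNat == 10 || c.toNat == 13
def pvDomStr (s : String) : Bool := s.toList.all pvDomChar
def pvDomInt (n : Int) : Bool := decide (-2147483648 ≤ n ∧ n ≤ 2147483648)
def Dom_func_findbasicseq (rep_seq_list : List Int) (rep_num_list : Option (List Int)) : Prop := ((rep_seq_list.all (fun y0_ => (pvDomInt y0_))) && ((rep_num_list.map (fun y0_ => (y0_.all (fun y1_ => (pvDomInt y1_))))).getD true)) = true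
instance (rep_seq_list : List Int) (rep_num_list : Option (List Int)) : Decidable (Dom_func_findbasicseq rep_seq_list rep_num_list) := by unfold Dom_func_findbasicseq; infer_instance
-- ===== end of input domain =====

-- B replaces A's slice-comparison scan by the Z-algorithm (z[i] = longest common prefix of
-- s and s[i:]; the answer is the first i in [2, n//2] with z[i] >= i) and A's index-driven
-- nested append loops by a zip loop with list repetition (objective: alternative); on
-- None-mode inputs of length 1..3 B intentionally returns the whole list where A returns
-- leftover [] (see D_ below).

-- ===== PORT A =====
-- A's None-branch loop: iterates candidates, breaks on the first matching block,
-- otherwise leaves seq_list = rep_seq_list after every failed iteration.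
def pvAloop (rep_seq_list : List Int) : List Int → List Int → List Int
  | seq_list, [] => seq_list
  | _seq_list, i :: rest =>
    let seq_a := PySem.List.slice rep_seq_list none (some i)
    let seq_b := PySem.List.slice rep_seq_list (some i) (some (i + i))
    if seq_a == seq_b then seq_a
    else pvAloop rep_seq_list rep_seq_list rest

def func_findbasicseq (rep_seq_list : List Int) (rep_num_list : Option (List Int)) : List Int :=
  match rep_num_list with
  | none =>
    let cut_num := PySem.Int.floordiv (rep_seq_list.length : Int) 2
    pvAloop rep_seq_list [] (PySem.List.pyRange 2 (cut_num + 1) 1)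
  | some l =>
    (PySem.List.pyRange 0 (l.length : Int) 1).foldl (fun seq_list i =>
      let dis_rep_seq := PySem.List.pyGetD rep_seq_list i 0
      let dis_rep_num := PySem.List.pyGetD l i 0
      (PySem.List.pyRange 0 dis_rep_num 1).foldl (fun s _ => s ++ [dis_rep_seq]) seq_list) []

-- ===== PORT B =====
-- B's inner while loop 'while i + k < n and s[k] == s[i + k]: k += 1', with fuel = n
-- (the loop runs at most n times); in-range reads s[k], s[i+k] ported as getD (exact:
-- the guard i + k < n keeps both indices in range).
def pvZwhile (s : List Int) (i : Nat) : Nat → Nat → Nat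
  | 0, k => k
  | fuel + 1, k =>
    if i + k < s.length ∧ s.getD k 0 = s.getD (i + k) 0 then pvZwhile s i fuel (k + 1) else k

-- one iteration of B's Z-algorithm loop body, state (z, l, r)
def pvZstep (s : List Int) (st : List Nat × Nat × Nat) (i : Nat) : List Nat × Nat × Nat :=
  match st with
  | (z, l, r) =>
    let k0 := if i < r then min (r - i) (z.getD (i - l) 0) else 0
    let k := pvZwhile s i s.length k0
    let z' := z.set i k
    if r < i + k then (z', i, i + k) else (z', l, r)

def func_findbasicseq_alt (rep_seq_list : List Int) (rep_num_list : Option (List Int)) : List Int :=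
  match rep_num_list with
  | some l =>
    -- 'out += [x] * k' : list repetition, empty for k <= 0 (Int.toNat sends k <= 0 to 0, exact)
    (rep_seq_list.zip l).foldl (fun out p => out ++ List.replicate p.2.toNat p.1) []
  | none =>
    let s := rep_seq_list
    let n := s.length
    -- 'for i in range(1, n)' over Nat indices (all nonnegative, exact)
    let zlr := (List.range' 1 (n - 1)).foldl (pvZstep s) (List.replicate n 0, 0, 0)
    match (PySem.List.pyRange 2 (PySem.Int.floordiv (n : Int) 2 + 1) 1).find?
        (fun i => decide ((i : Int) ≤ (zlr.1.getD i.toNat 0 : Int))) with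
    | some i => PySem.List.slice s none (some i)
    | none => s

-- ===== PRECONDITION & SPEC =====
-- Pre_ excludes only the inputs where A raises IndexError: a rep_num_list longer than rep_seq_list.
def Pre_func_findbasicseq (rep_seq_list : List Int) (rep_num_list : Option (List Int)) : Prop :=
  (rep_num_list.getD []).length ≤ rep_seq_list.length
instance (rep_seq_list : List Int) (rep_num_list : Option (List Int)) : Decidable (Pre_func_findbasicseq rep_seq_list rep_num_list) := by unfold Pre_func_findbasicseq; infer_instance
def pvWitness_func_findbasicseq : List Int × Option (List Int) := ([1, 2, 1, 2], none)

-- On None-mode inputs of length 1..3 A's empty candidate range leaves the initial seq_list = []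
-- and A returns [], an artefact of its loop initialisation; B returns the whole rep_seq_list,
-- the intended "no shorter basic sequence" answer.
def D_func_findbasicseq (rep_seq_list : List Int) (rep_num_list : Option (List Int)) : Prop :=
  rep_num_list = none ∧ 1 ≤ rep_seq_list.length ∧ rep_seq_list.length ≤ 3
instance (rep_seq_list : List Int) (rep_num_list : Option (List Int)) : Decidable (D_func_findbasicseq rep_seq_list rep_num_list) := by unfold D_func_findbasicseq; infer_instance

def Spec_func_findbasicseq (rep_seq_list : List Int) (rep_num_list : Option (List Int)) (out : List Int) : Prop := ¬ D_func_findbasicseq rep_seq_list rep_num_list → out = func_findbasicseq_alt rep_seq_list rep_num_list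
instance (rep_seq_list : List Int) (rep_num_list : Option (List Int)) (out : List Int) : Decidable (Spec_func_findbasicseq rep_seq_list rep_num_list out) := by unfold Spec_func_findbasicseq; infer_instance

def pvDiffWitness_func_findbasicseq : List Int × Option (List Int) := ([7], none)
def pvDiffWitnessOut_func_findbasicseq : (List Int) × (List Int) := ([], [7])

-- ===== CLAIM (what is proved, stated in full; the proofs are below) =====
def Claim_unchanged_func_findbasicseq : Prop := ∀ (rep_seq_list : List Int) (rep_num_list : Option (List Int)), Dom_func_findbasicseq rep_seq_list rep_num_list → Pre_func_findbasicseq rep_seq_list rep_num_list → Spec_func_findbasicseq rep_seq_list rep_num_list (func_findbasicseq rep_seq_list rep_num_list)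
def Claim_changed_func_findbasicseq : Prop := Dom_func_findbasicseq (pvDiffWitness_func_findbasicseq.1) (pvDiffWitness_func_findbasicseq.2) ∧ Pre_func_findbasicseq (pvDiffWitness_func_findbasicseq.1) (pvDiffWitness_func_findbasicseq.2) ∧ D_func_findbasicseq (pvDiffWitness_func_findbasicseq.1) (pvDiffWitness_func_findbasicseq.2) ∧ func_findbasicseq (pvDiffWitness_func_findbasicseq.1) (pvDiffWitness_func_findbasicseq.2) = pvDiffWitnessOut_func_findbasicseq.1 ∧ func_findbasicseq_alt (pvDiffWitness_func_findbasicseq.1) (pvDiffWitness_func_findbasicseq.2) = pvDiffWitnessOut_func_findbasicseq.2 ∧ pvDiffWitnessOut_func_findbasicseq.1 ≠ pvDiffWitnessOut_func_findbasicseq.2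
def Claim_exact_func_findbasicseq : Prop := ∀ (rep_seq_list : List Int) (rep_num_list : Option (List Int)), Dom_func_findbasicseq rep_seq_list rep_num_list → Pre_func_findbasicseq rep_seq_list rep_num_list → D_func_findbasicseq rep_seq_list rep_num_list → func_findbasicseq rep_seq_list rep_num_list ≠ func_findbasicseq_alt rep_seq_list rep_num_list

-- ===== LEMMAS AND PROOFS =====

-- longest common prefix length of two lists (proof-side characterisation of z-values)
def pvLcp : List Int → List Int → Nat
  | a :: as, b :: bs => if a = b then pvLcp as bs + 1 else 0
  | _, _ => 0

-- L s i = z[i] for the string s: lcp of s and s.drop i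
def pvL (s : List Int) (i : Nat) : Nat := pvLcp s (s.drop i)

lemma pvLcp_le_right : ∀ a b : List Int, pvLcp a b ≤ b.length := by
  intro a
  induction a with
  | nil => intro b; simp [pvLcp]
  | cons x as ih =>
    intro b
    cases b with
    | nil => simp [pvLcp]
    | cons y bs =>
      by_cases h : x = y
      · simp only [pvLcp, h, if_pos, List.length_cons]
        exact Nat.succ_le_succ (ih bs)
      · simp [pvLcp, h]

lemma pvLcp_getD : ∀ (a b : List Int) (m : Nat), m < pvLcp a b → a.getD m 0 = b.getD m 0 := by
  intro a
  induction a with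
  | nil => intro b m h; simp [pvLcp] at h
  | cons x as ih =>
    intro b m h
    cases b with
    | nil => simp [pvLcp] at h
    | cons y bs =>
      by_cases hxy : x = y
      · cases m with
        | zero => simpa [List.getD] using hxy
        | succ m' =>
          simp only [pvLcp, hxy, if_pos] at h
          simpa [List.getD] using ih bs m' (by omega)
      · simp [pvLcp, hxy] at h

lemma pvLcp_mismatch : ∀ (a b : List Int), pvLcp a b < a.length → pvLcp a b < b.length →
    a.getD (pvLcp a b) 0 ≠ b.getD (pvLcp a b) 0 := by
  intro a
  induction a with
  | nil => intro b h _; simp at h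
  | cons x as ih =>
    intro b h1 h2
    cases b with
    | nil => simp at h2
    | cons y bs =>
      by_cases hxy : x = y
      · simp only [pvLcp, hxy, if_pos] at h1 h2 ⊢
        simpa [List.getD] using ih bs (by simp at h1; omega) (by simp at h2; omega)
      · simp [pvLcp, hxy, List.getD]

lemma le_pvLcp : ∀ (a b : List Int) (k : Nat), k ≤ a.length → k ≤ b.length →
    (∀ m, m < k → a.getD m 0 = b.getD m 0) → k ≤ pvLcp a b := by
  intro a
  induction a with
  | nil => intro b k hk _ _; simp at hk; omega
  | cons x as ih =>
    intro b k hka hkb hm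
    cases b with
    | nil => simp at hkb; omega
    | cons y bs =>
      cases k with
      | zero => omega
      | succ k' =>
        have hxy : x = y := by simpa [List.getD] using hm 0 (by omega)
        have : k' ≤ pvLcp as bs := by
          apply ih bs k' (by simpa using hka) (by simpa using hkb)
          intro m hm'
          simpa [List.getD] using hm (m + 1) (by omega)
        simp only [pvLcp, hxy, if_pos]
        omega

lemma getD_drop (s : List Int) (i m : Nat) : (s.drop i).getD m 0 = s.getD (i + m) 0 := by
  simp [List.getD_eq_getElem?_getD, List.getElem?_drop]

lemma pvL_le (s : List Int) (i : Nat) : pvL s i ≤ s.length - i := by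
  have := pvLcp_le_right s (s.drop i)
  simpa [pvL, List.length_drop] using this

lemma pvL_getD (s : List Int) (i m : Nat) (h : m < pvL s i) : s.getD m 0 = s.getD (i + m) 0 := by
  have := pvLcp_getD s (s.drop i) m h
  rwa [getD_drop] at this

lemma pvL_mismatch (s : List Int) (i : Nat) (h : pvL s i < s.length - i) :
    s.getD (pvL s i) 0 ≠ s.getD (i + pvL s i) 0 := by
  have h1 : pvL s i < s.length := by omega
  have := pvLcp_mismatch s (s.drop i) h1 (by simpa [List.length_drop] using h)
  rwa [getD_drop] at this

lemma le_pvL (s : List Int) (i k : Nat) (hk : i + k ≤ s.length)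
    (hm : ∀ m, m < k → s.getD m 0 = s.getD (i + m) 0) : k ≤ pvL s i := by
  apply le_pvLcp s (s.drop i) k (by omega) (by simp [List.length_drop]; omega)
  intro m hm'
  rw [getD_drop]
  exact hm m hm'

lemma pvZwhile_eq (s : List Int) (i : Nat) : ∀ (fuel k : Nat), k ≤ pvL s i →
    pvL s i ≤ k + fuel → pvZwhile s i fuel k = pvL s i := by
  intro fuel
  induction fuel with
  | zero => intro k h1 h2; simp only [pvZwhile]; omega
  | succ f ih =>
    intro k h1 h2
    rcases Nat.lt_or_ge k (pvL s i) with hlt | hge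
    · have hL := pvL_le s i
      have hin : i + k < s.length := by omega
      have heq : s.getD k 0 = s.getD (i + k) 0 := pvL_getD s i k hlt
      simp only [pvZwhile, if_pos (And.intro hin heq)]
      exact ih (k + 1) (by omega) (by omega)
    · have hk : k = pvL s i := by omega
      subst hk
      simp only [pvZwhile]
      rw [if_neg]
      rintro ⟨hin, heq⟩
      exact pvL_mismatch s i (by omega) heq

-- loop invariant for B's Z-algorithm fold: entries of z below i are correct,
-- and the (l, r) window is a true match window left of i
def pvZInv (s : List Int) (i : Nat) (st : List Nat × Nat × Nat) : Prop :=
  st.1.length = s.length ∧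
  (∀ j, 1 ≤ j → j < i → st.1.getD j 0 = pvL s j) ∧
  ((st.2.1 = 0 ∧ st.2.2 = 0) ∨ (1 ≤ st.2.1 ∧ st.2.1 < i ∧ st.2.2 ≤ st.2.1 + pvL s st.2.1))

lemma pvZstep_inv (s : List Int) (i : Nat) (st : List Nat × Nat × Nat)
    (hi : 1 ≤ i) (hin : i < s.length) (h : pvZInv s i st) :
    pvZInv s (i + 1) (pvZstep s st i) := by
  obtain ⟨z, l, r⟩ := st
  obtain ⟨hlen, hz, hw⟩ := h
  dsimp only at hlen hz hw
  have hk0 : (if i < r then min (r - i) (z.getD (i - l) 0) else 0) ≤ pvL s i := by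
    split_ifs with hir
    · rcases hw with ⟨hl0, hr0⟩ | ⟨hl1, hli, hrw⟩
      · omega
      · have hzl : z.getD (i - l) 0 = pvL s (i - l) := hz (i - l) (by omega) (by omega)
        rw [hzl]
        have hLl := pvL_le s l
        apply le_pvL
        · omega
        · intro m hm
          have hm1 : m < r - i := by omega
          have hm2 : m < pvL s (i - l) := by omega
          have e1 : s.getD m 0 = s.getD ((i - l) + m) 0 := pvL_getD s (i - l) m hm2
          have hm3 : (i - l) + m < pvL s l := by omega
          have e2 : s.getD ((i - l) + m) 0 = s.getD (l + ((i - l) + m)) 0 := pvL_getD s l _ hm3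
          have e3 : l + ((i - l) + m) = i + m := by omega
          rw [e1, e2, e3]
    · omega
  have hLn : pvL s i ≤ s.length - i := pvL_le s i
  have hk : pvZwhile s i s.length (if i < r then min (r - i) (z.getD (i - l) 0) else 0) = pvL s i :=
    pvZwhile_eq s i s.length _ hk0 (by omega)
  simp only [pvZstep, hk]
  have hset_len : (z.set i (pvL s i)).length = s.length := by simp [hlen]
  have hset_get : ∀ j, 1 ≤ j → j < i + 1 → (z.set i (pvL s i)).getD j 0 = pvL s j := by
    intro j hj1 hj2
    rcases Nat.lt_or_ge j i with hji | hji
    · rw [List.getD_eq_getElem?_getD, List.getElem?_set_ne (by omega),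
        ← List.getD_eq_getElem?_getD]
      exact hz j hj1 hji
    · have hji' : j = i := by omega
      subst hji'
      rw [List.getD_eq_getElem?_getD, List.getElem?_set_self (by omega)]
      rfl
  split_ifs with hr
  · exact ⟨hset_len, hset_get, Or.inr ⟨hi, by dsimp only; omega, by dsimp only; omega⟩⟩
  · refine ⟨hset_len, hset_get, ?_⟩
    rcases hw with hw | ⟨hl1, hli, hrw⟩
    · exact Or.inl hw
    · exact Or.inr ⟨hl1, by dsimp only; omega, hrw⟩

lemma pvZloop_inv (s : List Int) : ∀ (c i : Nat) (st : List Nat × Nat × Nat),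
    1 ≤ i → i + c ≤ s.length → pvZInv s i st →
    pvZInv s (i + c) ((List.range' i c).foldl (pvZstep s) st) := by
  intro c
  induction c with
  | zero => intro i st _ _ h; simpa using h
  | succ c' ih =>
    intro i st hi hc h
    rw [List.range'_succ]
    simp only [List.foldl_cons]
    have := ih (i + 1) (pvZstep s st i) (by omega) (by omega)
      (pvZstep_inv s i st hi (by omega) h)
    have e : i + 1 + c' = i + (c' + 1) := by omega
    rwa [e] at this

-- the computed z-array is correct at every index 1 ≤ j < n
lemma pvZ_final (s : List Int) (j : Nat) (hj1 : 1 ≤ j) (hj2 : j < s.length) :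
    ((List.range' 1 (s.length - 1)).foldl (pvZstep s)
      (List.replicate s.length 0, 0, 0)).1.getD j 0 = pvL s j := by
  have h0 : pvZInv s 1 (List.replicate s.length 0, 0, 0) := by
    refine ⟨by simp, ?_, Or.inl ⟨rfl, rfl⟩⟩
    intro j h1 h2; omega
  have hfin := pvZloop_inv s (s.length - 1) 1 _ (by omega) (by omega) h0
  exact hfin.2.1 j hj1 (by omega)

-- A's candidate test s[:t] == s[t:2t] is exactly 't ≤ z[t]' (for 2t ≤ n)
lemma slice_eq_iff_le_pvL (s : List Int) (t : Nat) (ht : t + t ≤ s.length) :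
    (s.take t = (s.drop t).take t) ↔ t ≤ pvL s t := by
  constructor
  · intro heq
    apply le_pvL s t t (by omega)
    intro m hm
    have h1 : (s.take t).getD m 0 = s.getD m 0 := by
      rw [List.getD_eq_getElem?_getD, List.getElem?_take_of_lt hm, ← List.getD_eq_getElem?_getD]
    have h2 : ((s.drop t).take t).getD m 0 = s.getD (t + m) 0 := by
      rw [List.getD_eq_getElem?_getD, List.getElem?_take_of_lt hm, ← List.getD_eq_getElem?_getD,
        getD_drop]
    rw [← h1, ← h2, heq]
  · intro hle
    apply List.ext_getElem
    · simp [List.length_take, List.length_drop]; omega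
    · intro m hm1 hm2
      simp only [List.length_take] at hm1
      have hmt : m < t := by omega
      have := pvL_getD s t m (by omega)
      have hms : m < s.length := by omega
      have hmd : m < (s.drop t).length := by simp [List.length_drop]; omega
      simp only [List.getElem_take, List.getElem_drop]
      have e1 : s.getD m 0 = s[m] := by simp [List.getD_eq_getElem?_getD, List.getElem?_eq_getElem hms]
      have e2 : s.getD (t + m) 0 = s[t + m] := by
        simp [List.getD_eq_getElem?_getD, List.getElem?_eq_getElem (show t + m < s.length by omega)]
      rw [e1, e2] at this
      exact this

-- first-match formulation of A's break-on-match loop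
lemma pvAloop_eq (seq s0 : List Int) (is : List Int) (h : is ≠ []) :
    pvAloop seq s0 is =
      match is.find? (fun i => PySem.List.slice seq none (some i) ==
          PySem.List.slice seq (some i) (some (i + i))) with
      | some i => PySem.List.slice seq none (some i)
      | none => seq := by
  induction is generalizing s0 with
  | nil => exact absurd rfl h
  | cons i rest ih =>
    by_cases hp : (PySem.List.slice seq none (some i) ==
        PySem.List.slice seq (some i) (some (i + i))) = true
    · simp [pvAloop, hp]
    · rw [Bool.not_eq_true] at hp
      have h1 : pvAloop seq s0 (i :: rest) = pvAloop seq seq rest := by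
        simp [pvAloop, hp]
      have h2 : List.find? (fun i => PySem.List.slice seq none (some i) ==
            PySem.List.slice seq (some i) (some (i + i))) (i :: rest) =
          List.find? (fun i => PySem.List.slice seq none (some i) ==
            PySem.List.slice seq (some i) (some (i + i))) rest := by
        simp [hp]
      rw [h1, h2]
      cases rest with
      | nil => simp [pvAloop, List.find?]
      | cons j r => exact ih seq (by simp)

lemma find?_congr_mem {α : Type} (l : List α) (p q : α → Bool)
    (h : ∀ x ∈ l, p x = q x) : l.find? p = l.find? q := by
  induction l with
  | nil => rfl
  | cons x xs ih =>
    simp only [List.find?_cons]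
    rw [h x (by simp)]
    cases q x
    · exact ih (fun y hy => h y (by simp [hy]))
    · rfl

lemma pvZipRange (seq l : List Int) (h : l.length ≤ seq.length) :
    seq.zip l = (PySem.List.pyRange 0 (l.length : Int) 1).map
      (fun i => (PySem.List.pyGetD seq i 0, PySem.List.pyGetD l i 0)) := by
  rw [PySem.List.pyRange_zero_natCast, List.map_map]
  apply List.ext_getElem
  · simp [List.length_zip]; omega
  · intro k hk hk'
    simp only [List.length_zip] at hk
    have hkl : k < l.length := by omega
    have hks : k < seq.length := by omega
    simp [List.getElem_zip, Function.comp, PySem.List.pyGetD_natCast,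
      List.getD_eq_getElem?_getD, hkl, hks]

theorem func_findbasicseq_spec : Claim_unchanged_func_findbasicseq := by
  intro seq nums _ hpre hnd
  cases nums with
  | some l =>
    simp only [Pre_func_findbasicseq, Option.getD_some] at hpre
    simp only [func_findbasicseq, func_findbasicseq_alt]
    rw [pvZipRange seq l hpre, List.foldl_map]
    apply PySem.List.foldl_congr_mem
    intro acc i _
    rw [PySem.List.foldl_append_singleton_eq_map, List.map_const', PySem.List.length_pyRange_one]
    simp
  | none =>
    have hnd' : ¬ (1 ≤ seq.length ∧ seq.length ≤ 3) := fun hh =>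
      hnd ⟨rfl, hh.1, hh.2⟩
    have hcut : PySem.Int.floordiv (seq.length : Int) 2 = ((seq.length / 2 : Nat) : Int) := by
      exact_mod_cast PySem.Int.floordiv_natCast seq.length 2
    have hlen0 : seq.length = 0 ∨ 4 ≤ seq.length := by omega
    rcases hlen0 with h0 | h4
    · -- n = 0 : both candidate ranges are empty and both sides return the empty list
      have hsnil : seq = [] := List.eq_nil_of_length_eq_zero h0
      subst hsnil
      decide
    simp only [func_findbasicseq, func_findbasicseq_alt, hcut]
    rw [pvAloop_eq seq [] _ ?hne]
    case hne =>
      have h2 : (2 : Int) < ((seq.length / 2 : Nat) : Int) + 1 := by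
        have : 2 ≤ seq.length / 2 := by omega
        omega
      rw [PySem.List.pyRange_one_cons h2]
      simp
    rw [find?_congr_mem _ _ _ ?hpred]
    case hpred =>
      intro i hi
      rw [PySem.List.mem_pyRange_one] at hi
      have hi2 : 2 ≤ i := hi.1
      have hiub : i ≤ ((seq.length / 2 : Nat) : Int) := by omega
      set t : Nat := i.toNat with ht
      have hit : i = (t : Int) := by omega
      have htn : t + t ≤ seq.length := by omega
      have h1t : 1 ≤ t := by omega
      have htlt : t < seq.length := by omega
      rw [hit, PySem.List.slice_to_natCast, PySem.List.slice_natCast_add seq t t,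
        pvZ_final seq t h1t htlt]
      by_cases hle : t ≤ pvL seq t
      · have h1 := (slice_eq_iff_le_pvL seq t htn).mpr hle
        have h2 : ((t : Int) ≤ ((pvL seq t : Nat) : Int)) := by exact_mod_cast hle
        simp [h1, h2]
      · have h1 : ¬ (seq.take t = (seq.drop t).take t) := fun hh =>
          absurd ((slice_eq_iff_le_pvL seq t htn).mp hh) hle
        have h2 : ¬ ((t : Int) ≤ ((pvL seq t : Nat) : Int)) := by exact_mod_cast hle
        simp [h1, h2]

theorem func_findbasicseq_changed : Claim_changed_func_findbasicseq := by
  unfold Claim_changed_func_findbasicseq; decide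

theorem func_findbasicseq_tight : Claim_exact_func_findbasicseq := by
  intro seq nums _ _ hd
  obtain ⟨hn, h1, h3⟩ := hd
  subst hn
  have hcut : PySem.Int.floordiv (seq.length : Int) 2 = ((seq.length / 2 : Nat) : Int) := by
    exact_mod_cast PySem.Int.floordiv_natCast seq.length 2
  have hnil : PySem.List.pyRange 2 (((seq.length / 2 : Nat) : Int) + 1) 1 = [] := by
    apply PySem.List.pyRange_one_eq_nil
    have : seq.length / 2 ≤ 1 := by omega
    omega
  simp only [func_findbasicseq, func_findbasicseq_alt, hcut, hnil]
  simp [pvAloop, List.find?]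
  intro hcontra
  exact absurd (congrArg List.length hcontra.symm) (by simp; omega)
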